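-- pv_equiv track=rewrite | github.com/kuk329/codingTestPractice | programmers/level1/과일 장수.py | solution
-- ===== SOURCE A (Python) =====
-- def solution(k, m, score):
--     answer = 0
--     box=[]
--     count=0
--     score.sort(reverse=True) # 내림차순
--     for n in score:
--         if count<m:
--             box.append(n)
--             count+=1
--         if count==m:
--             count=0
--             answer+=box[-1]*m
--             box=[]
--
--
--     return answer
-- ===== SOURCE B (Python) =====
-- def solution(k, m, score):
--     score.sort(reverse=True)  # keep A's in-place descending sort (observable mutation)
--     # after sorting, the minimum of each full box of m sits at indices m-1, 2m-1, ...
--     return m * sum(score[i] for i in range(m - 1, len(score), m))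
-- ===== Notes on version B (the rewrite author's own statement) =====
-- stated objective: simpler
-- what changed: Instead of scanning every element while maintaining a box list and a wrap-around counter, B sorts descending and directly sums the box minimums, which sit at indices m-1, 2m-1, ... of the sorted list, via range(m-1, len(score), m); no per-element state or branching remains.
-- outside the precondition, e.g. on solution(1, 0, []): A returns 0, B raises ValueError
import Mathlib
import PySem

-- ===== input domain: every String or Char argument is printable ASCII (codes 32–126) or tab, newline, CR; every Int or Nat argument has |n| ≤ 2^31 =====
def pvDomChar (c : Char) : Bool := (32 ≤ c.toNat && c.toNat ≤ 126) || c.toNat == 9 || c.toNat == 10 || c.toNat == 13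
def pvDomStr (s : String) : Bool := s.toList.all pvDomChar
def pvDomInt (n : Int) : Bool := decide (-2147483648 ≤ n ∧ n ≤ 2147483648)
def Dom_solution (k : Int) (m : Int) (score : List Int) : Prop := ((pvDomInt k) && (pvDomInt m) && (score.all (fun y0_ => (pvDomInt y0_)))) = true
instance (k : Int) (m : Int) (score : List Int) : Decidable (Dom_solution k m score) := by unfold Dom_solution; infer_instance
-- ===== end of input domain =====

-- B replaces A's box-and-counter scan by directly summing the sorted list's elements at
-- indices m-1, 2m-1, ... (simpler; same asymptotic cost). Both sort score in place in
-- Python (observable mutation kept identical); the equivalence proved is about the return value.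


-- ===== PORT A =====
-- one step of A's loop body over the state (answer, box, count);
-- box[-1] is PySem.List.pyGet? box (-1); the `.getD 0` only fires where Python raises
-- IndexError (m = 0 with a nonempty box situation), which Pre_solution excludes
def solutionStep (m : Int) (st : Int × List Int × Int) (n : Int) : Int × List Int × Int :=
  let answer := st.1
  let box := st.2.1
  let count := st.2.2
  let box' := if count < m then box ++ [n] else box
  let count' := if count < m then count + 1 else count
  if count' = m then (answer + (PySem.List.pyGet? box' (-1)).getD 0 * m, ([] : List Int), (0 : Int))
  else (answer, box', count')

def solution (k : Int) (m : Int) (score : List Int) : Int :=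
  let sorted := PySem.List.sorted score (fun x => x) true
  (sorted.foldl (solutionStep m) ((0 : Int), ([] : List Int), (0 : Int))).1

-- ===== PORT B =====
-- score[i] is always in range for i ∈ range(m-1, len, m); `.getD 0` never fires there
def solution_alt (k : Int) (m : Int) (score : List Int) : Int :=
  let sorted := PySem.List.sorted score (fun x => x) true
  m * ((PySem.List.pyRange (m - 1) (sorted.length : Int) m).map
        (fun i => (PySem.List.pyGet? sorted i).getD 0)).sum

-- ===== PRECONDITION & SPEC =====
-- Pre_ excludes only m = 0: there A raises IndexError on any nonempty score, and on the
-- empty score (where A returns 0) B's range step of 0 raises ValueError.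
def Pre_solution (k : Int) (m : Int) (score : List Int) : Prop := m ≠ 0
instance (k : Int) (m : Int) (score : List Int) : Decidable (Pre_solution k m score) := by unfold Pre_solution; infer_instance
def pvWitness_solution : Int × Int × List Int := (4, 3, [1, 2, 3, 1, 2, 3, 1])

def Spec_solution (k : Int) (m : Int) (score : List Int) (out : Int) : Prop := out = solution_alt k m score
instance (k : Int) (m : Int) (score : List Int) (out : Int) : Decidable (Spec_solution k m score out) := by unfold Spec_solution; infer_instance

-- ===== CLAIM (what is proved, stated in full; the proofs are below) =====
def Claim_equal_solution : Prop := ∀ (k : Int) (m : Int) (score : List Int), Dom_solution k m score → Pre_solution k m score → Spec_solution k m score (solution k m score)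

-- ===== LEMMAS AND PROOFS =====

-- the common value: sum of every m-th element, j elements before the next pick
def strided (m : Int) : Int → List Int → Int
  | _, [] => 0
  | j, x :: xs => if j ≤ 0 then x + strided m (m - 1) xs else strided m (j - 1) xs

theorem pyGet?_append_neg_one (l : List Int) (x : Int) :
    PySem.List.pyGet? (l ++ [x]) (-1) = some x := by
  simp [PySem.List.pyGet?, PySem.List.pyIdx?]

theorem pyGet?_cons_succ (x : Int) (xs : List Int) (i : Int) (hi : 0 ≤ i) :
    PySem.List.pyGet? (x :: xs) (i + 1) = PySem.List.pyGet? xs i := by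
  simp only [PySem.List.pyGet?, PySem.List.pyIdx?]
  obtain ⟨n, rfl⟩ := Int.eq_ofNat_of_zero_le hi
  have h1 : ((n : Int) + 1).toNat = n + 1 := by omega
  simp only [List.length_cons]
  split_ifs with h2 h3 h4 h5 <;> simp_all <;> omega

theorem pyRange_shift (a b st : Int) (hst : 0 < st) :
    PySem.List.pyRange (a + 1) (b + 1) st = (PySem.List.pyRange a b st).map (· + 1) := by
  rw [PySem.List.pyRange_of_pos _ _ hst, PySem.List.pyRange_of_pos _ _ hst]
  by_cases hab : a < b
  · rw [if_pos hab, if_pos (by omega : a + 1 < b + 1),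
      (by ring : b + 1 - (a + 1) + st - 1 = b - a + st - 1), List.map_map]
    apply List.map_congr_left
    intro k _
    simp
    ring
  · rw [if_neg hab, if_neg (by omega : ¬ (a + 1 < b + 1))]
    simp

theorem pyRange_cons (a b st : Int) (hst : 0 < st) (hab : a < b) :
    PySem.List.pyRange a b st = a :: PySem.List.pyRange (a + st) b st := by
  rw [PySem.List.pyRange_of_pos _ _ hst, PySem.List.pyRange_of_pos _ _ hst]
  have hc : b - a + st - 1 = (b - (a + st) + st - 1) + 1 * st := by ring
  by_cases h2 : a + st < b
  · rw [if_pos hab, if_pos h2, hc, Int.add_mul_ediv_right _ _ (by omega)]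
    have hnn : 0 ≤ (b - (a + st) + st - 1) / st := by
      apply Int.ediv_nonneg <;> omega
    have : ((b - (a + st) + st - 1) / st + 1).toNat = ((b - (a + st) + st - 1) / st).toNat + 1 := by
      omega
    rw [this, List.range_succ_eq_map]
    simp only [List.map_cons, List.map_map, Int.natCast_zero]
    refine List.cons_eq_cons.mpr ⟨by ring_nf, ?_⟩
    apply List.map_congr_left; intro k _
    simp [Nat.succ_eq_add_one]
    push_cast
    ring
  · -- exactly one element: count = 1
    rw [if_pos hab, if_neg h2]
    have h1 : (b - a + st - 1) / st = 1 := by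
      have hle : 1 ≤ (b - a + st - 1) / st :=
        (Int.le_ediv_iff_mul_le (by omega)).mpr (by omega)
      have hlt : (b - a + st - 1) / st < 2 :=
        (Int.ediv_lt_iff_lt_mul (by omega)).mpr (by omega)
      omega
    rw [h1]
    simp

theorem strided_sum (m : Int) (hm : 1 ≤ m) (s : List Int) :
    ∀ r : Int, 0 ≤ r →
      ((PySem.List.pyRange r (s.length : Int) m).map
        (fun i => (PySem.List.pyGet? s i).getD 0)).sum = strided m r s := by
  induction s with
  | nil =>
    intro r hr
    rw [PySem.List.pyRange_of_pos _ _ (by omega : (0:Int) < m),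
      if_neg (by simp; omega : ¬ (r < (([] : List Int).length : Int)))]
    simp [strided]
  | cons x xs ih =>
    intro r hr
    rcases eq_or_lt_of_le hr with h0 | hpos
    · -- r = 0 : pick the head, continue at m - 1
      subst h0
      have hab : (0 : Int) < ((x :: xs).length : Int) := by simp
      rw [pyRange_cons _ _ _ (by omega) hab]
      have hsh : ((x :: xs).length : Int) = (xs.length : Int) + 1 := by simp
      have : (0 : Int) + m = (m - 1) + 1 := by ring
      rw [List.map_cons, List.sum_cons, this, hsh, pyRange_shift _ _ _ (by omega)]
      rw [List.map_map]
      have hmap : ∀ i ∈ PySem.List.pyRange (m - 1) (xs.length : Int) m,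
          ((fun i => (PySem.List.pyGet? (x :: xs) i).getD 0) ∘ (· + 1)) i
            = (fun i => (PySem.List.pyGet? xs i).getD 0) i := by
        intro i hi
        have := (PySem.List.mem_pyRange_iff_of_pos (by omega : (0:Int) < m) i).mp hi
        simp only [Function.comp]
        rw [pyGet?_cons_succ _ _ _ (by omega)]
      rw [List.map_congr_left hmap, ih (m - 1) (by omega)]
      simp [strided, PySem.List.pyGet?, PySem.List.pyIdx?, strided]
    · -- r ≥ 1 : shift everything down one position
      have hr1 : r = (r - 1) + 1 := by ring
      have hsh : ((x :: xs).length : Int) = (xs.length : Int) + 1 := by simp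
      rw [hr1, hsh, pyRange_shift _ _ _ (by omega), List.map_map]
      have hmap : ∀ i ∈ PySem.List.pyRange (r - 1) (xs.length : Int) m,
          ((fun i => (PySem.List.pyGet? (x :: xs) i).getD 0) ∘ (· + 1)) i
            = (fun i => (PySem.List.pyGet? xs i).getD 0) i := by
        intro i hi
        have := (PySem.List.mem_pyRange_iff_of_pos (by omega : (0:Int) < m) i).mp hi
        simp only [Function.comp]
        rw [pyGet?_cons_succ _ _ _ (by omega)]
      rw [List.map_congr_left hmap, ih (r - 1) (by omega)]
      have hgt : ¬ ((r - 1) + 1 ≤ 0) := by omega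
      have hcons : strided m (r - 1 + 1) (x :: xs) = strided m (r - 1 + 1 - 1) xs := by
        simp only [strided]
        rw [if_neg hgt]
      rw [hcons]
      norm_num

theorem foldA_strided (m : Int) (hm : 1 ≤ m) (s : List Int) :
    ∀ (a : Int) (box : List Int) (c : Int), 0 ≤ c → c < m →
      (s.foldl (solutionStep m) (a, box, c)).1 = a + m * strided m (m - 1 - c) s := by
  induction s with
  | nil => intro a box c _ _; simp [strided]
  | cons x xs ih =>
    intro a box c hc0 hcm
    rw [List.foldl_cons]
    by_cases hfull : c + 1 = m
    · have hstep : solutionStep m (a, box, c) x = (a + x * m, ([] : List Int), (0 : Int)) := by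
        simp only [solutionStep]
        rw [if_pos hcm, if_pos hcm, if_pos hfull, pyGet?_append_neg_one]
        rfl
      rw [hstep, ih _ _ _ le_rfl (by omega)]
      have h0 : m - 1 - c = 0 := by omega
      rw [h0]
      simp only [strided, if_pos (le_refl (0:Int))]
      ring_nf
    · have hstep : solutionStep m (a, box, c) x = (a, box ++ [x], c + 1) := by
        simp only [solutionStep]
        rw [if_pos hcm, if_pos hcm, if_neg hfull]
      rw [hstep, ih _ _ _ (by omega) (by omega)]
      have hne : ¬ (m - 1 - c ≤ 0) := by omega
      conv_rhs => rw [show (x :: xs) = x :: xs from rfl]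
      simp only [strided, if_neg hne]
      ring_nf

theorem foldA_neg (m : Int) (hm : m < 0) (s : List Int) :
    ∀ st : Int × List Int × Int, ¬ st.2.2 < m → st.2.2 ≠ m →
      s.foldl (solutionStep m) st = st := by
  induction s with
  | nil => intro st _ _; rfl
  | cons x xs ih =>
    intro st h1 h2
    rw [List.foldl_cons]
    have hstep : solutionStep m st x = st := by
      simp only [solutionStep]
      rw [if_neg h1, if_neg h1, if_neg h2]
    rw [hstep]
    exact ih st h1 h2

-- ===== VERDICT (by name: the statement is the Claim_ definition above) =====
theorem solution_spec : Claim_equal_solution := by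
  intro k m score _ hpre
  simp only [Spec_solution, solution, solution_alt]
  set s := PySem.List.sorted score (fun x => x) true with hs
  rcases lt_or_gt_of_ne hpre with hneg | hpos
  · rw [foldA_neg m hneg s (0, [], 0)
      (show ¬ (0:Int) < m by omega) (show (0:Int) ≠ m by omega)]
    have hns : ¬ ((s.length : Int) < m - 1) := by omega
    simp [PySem.List.pyRange, hns, show ¬ (0:Int) < m by omega]
  · have h1 : (1 : Int) ≤ m := hpos
    rw [foldA_strided m h1 s 0 [] 0 le_rfl (by omega)]
    rw [strided_sum m h1 s (m - 1) (by omega)]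
    ring
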